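-- pv_equiv track=rewrite | github.com/amrtanair/master_thesis | srl_aware_oie.py | collect_context
-- ===== SOURCE A (Python) =====
-- def collect_context(lst, target_label='B-V'):
--     include_list = [
--         'B-ARG0',
--         'B-ARG1',
--         'B-ARG2',
--         'I-ARG0',
--         'I-ARG1',
--         'I-ARG2',
--         ]
--     args = []
--     index = next((i for (i, (label, _)) in enumerate(lst) if label
--                  == target_label), None)
--     if index is not None:
--         left_context = [(label, word) for (label, word) in
--                         reversed(lst[:index]) if label not in 'O']
--         right_context = [(label, word) for (label, word) in lst[index
--                          + 1:] if label not in 'O']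
--         context = [left_context[::-1], right_context]
--
--         args = [' '.join([word for (label, word) in c]) for c in
--                 context]
--         args.append(lst[index][1])
--
--         if args[0] == '' or args[1] == '':
--             return None
--         return args
--     return None
-- ===== SOURCE B (Python) =====
-- def collect_context(lst, target_label='B-V'):
--     found = False
--     target_word = None
--     left = []
--     right = []
--     for (label, word) in lst:
--         if not found and label == target_label:
--             found = True
--             target_word = word
--         elif label not in 'O':
--             if found:
--                 right.append(word)
--             else:
--                 left.append(word)
--     if not found:
--         return None
--     left_str = ' '.join(left)
--     right_str = ' '.join(right)
--     if left_str == '' or right_str == '':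
--         return None
--     return [left_str, right_str, target_word]
-- ===== Notes on version B (the rewrite author's own statement) =====
-- stated objective: alternative
-- what changed: Replaced A's next()-index search plus two slice comprehensions (plus a reverse) with a single pass over the list keeping a found flag, the target word and left/right word accumulators.
import Mathlib
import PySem

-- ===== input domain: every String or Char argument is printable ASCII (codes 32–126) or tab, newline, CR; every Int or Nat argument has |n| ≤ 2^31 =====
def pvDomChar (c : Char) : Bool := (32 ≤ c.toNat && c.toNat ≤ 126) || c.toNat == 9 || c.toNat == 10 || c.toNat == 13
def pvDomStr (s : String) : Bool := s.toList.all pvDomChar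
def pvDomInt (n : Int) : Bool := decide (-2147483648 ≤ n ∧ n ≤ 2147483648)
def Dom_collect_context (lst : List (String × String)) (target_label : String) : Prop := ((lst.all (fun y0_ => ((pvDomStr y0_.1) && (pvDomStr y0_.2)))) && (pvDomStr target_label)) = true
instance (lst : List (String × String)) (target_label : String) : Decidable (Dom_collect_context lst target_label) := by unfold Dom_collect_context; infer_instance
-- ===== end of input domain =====

-- B replaces A's index-search-then-two-slice-comprehensions by a single pass with a found flag
-- and left/right word accumulators (objective: alternative, one traversal instead of three).


-- ===== PORT A =====
-- literal port of A: find the first index whose label equals target_label, then build the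
-- left context from the reversed prefix slice and the right context from the suffix slice,
-- each filtered by Python's substring test `label not in 'O'`, join the words and check emptiness.
def collect_context (lst : List (String × String)) (target_label : String) : Option (List String) :=
  let _include_list : List String :=
    ["B-ARG0", "B-ARG1", "B-ARG2", "I-ARG0", "I-ARG1", "I-ARG2"]  -- dead in A, kept for fidelity
  match lst.findIdx? (fun p => p.1 == target_label) with
  | none => none
  | some index =>
    let left_context := (PySem.List.slice lst none (some (index : Int))).reverse.filter
        (fun p => !(PySem.Str.isIn p.1 "O"))
    let right_context := (PySem.List.slice lst (some ((index : Int) + 1)) none).filter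
        (fun p => !(PySem.Str.isIn p.1 "O"))
    let context := [left_context.reverse, right_context]
    let args := context.map (fun c => PySem.Str.join " " (c.map (fun p => p.2)))
    let args := args ++ [(PySem.List.pyGetD lst (index : Int) ("", "")).2]
    if PySem.List.pyGetD args 0 "" == "" || PySem.List.pyGetD args 1 "" == "" then none
    else some args

-- ===== PORT B =====
-- loop body of B's single pass; state = (found, target_word, left words, right words)
def ccStep (target_label : String)
    (st : Bool × Option String × List String × List String) (p : String × String) :
    Bool × Option String × List String × List String :=
  let (found, tw, left, right) := st
  if !found && p.1 == target_label then (true, some p.2, left, right)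
  else if !(PySem.Str.isIn p.1 "O") then
    if found then (found, tw, left, right ++ [p.2]) else (found, tw, left ++ [p.2], right)
  else (found, tw, left, right)

def collect_context_alt (lst : List (String × String)) (target_label : String) :
    Option (List String) :=
  let st := lst.foldl (ccStep target_label) (false, none, [], [])
  let (found, tw, left, right) := st
  if !found then none
  else
    let left_str := PySem.Str.join " " left
    let right_str := PySem.Str.join " " right
    if left_str == "" || right_str == "" then none
    else some [left_str, right_str, tw.getD ""]

-- ===== PRECONDITION & SPEC =====
def Spec_collect_context (lst : List (String × String)) (target_label : String) (out : Option (List String)) : Prop := out = collect_context_alt lst target_label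
instance (lst : List (String × String)) (target_label : String) (out : Option (List String)) : Decidable (Spec_collect_context lst target_label out) := by unfold Spec_collect_context; infer_instance

-- ===== CLAIM (what is proved, stated in full; the proofs are below) =====
def Claim_equal_collect_context : Prop := ∀ (lst : List (String × String)) (target_label : String), Dom_collect_context lst target_label → Spec_collect_context lst target_label (collect_context lst target_label)

-- ===== LEMMAS AND PROOFS =====

-- B's fold over elements none of which matches collects kept words on the left
theorem ccFold_false (t : String) (xs : List (String × String))
    (h : ∀ p ∈ xs, ¬(p.1 == t) = true) (left right : List String) :
    xs.foldl (ccStep t) (false, none, left, right)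
      = (false, none, left ++ (xs.filter (fun p => !(PySem.Str.isIn p.1 "O"))).map (·.2), right) := by
  induction xs generalizing left with
  | nil => simp
  | cons p xs ih =>
    have hp : (p.1 == t) = false := by simpa using h p (by simp)
    cases hk : PySem.Chars.isIn p.1.toList ['O'] <;>
      simp [ccStep, hp, hk,
        ih (fun q hq => h q (List.mem_cons_of_mem _ hq))]

-- after the target was found, B's fold collects kept words on the right
theorem ccFold_true (t : String) (xs : List (String × String))
    (tw : Option String) (left right : List String) :
    xs.foldl (ccStep t) (true, tw, left, right)
      = (true, tw, left, right ++ (xs.filter (fun p => !(PySem.Str.isIn p.1 "O"))).map (·.2)) := by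
  induction xs generalizing right with
  | nil => simp
  | cons p xs ih =>
    cases hk : PySem.Chars.isIn p.1.toList ['O'] <;>
      simp [ccStep, hk, ih]

-- closed form of B when the target occurs, via the take/drop split at the first match
theorem alt_of_found (lst : List (String × String)) (t : String) (i : Nat)
    (hi : i < lst.length) (hmatch : (lst[i].1 == t) = true)
    (hpre : ∀ j (hj : j < i), ¬(lst[j].1 == t) = true) :
    collect_context_alt lst t =
      (let lw := ((lst.take i).filter (fun p => !(PySem.Str.isIn p.1 "O"))).map (·.2)
       let rw := ((lst.drop (i+1)).filter (fun p => !(PySem.Str.isIn p.1 "O"))).map (·.2)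
       if PySem.Str.join " " lw == "" || PySem.Str.join " " rw == "" then none
       else some [PySem.Str.join " " lw, PySem.Str.join " " rw, lst[i].2]) := by
  have hsplit : lst = lst.take i ++ lst[i] :: lst.drop (i + 1) := by
    conv_lhs => rw [← List.take_append_drop i lst]
    rw [List.getElem_cons_drop]
  unfold collect_context_alt
  conv_lhs => rw [hsplit]
  rw [List.foldl_append]
  rw [ccFold_false t (lst.take i)
    (by
      intro p hp
      obtain ⟨j, hj, rfl⟩ := List.getElem_of_mem hp
      have hjlen : j < i := lt_of_lt_of_le hj (by simp [List.length_take])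
      rw [List.getElem_take]
      exact hpre j hjlen) [] []]
  have hstep : ccStep t (false, none,
      ((lst.take i).filter (fun p => !(PySem.Str.isIn p.1 "O"))).map (·.2), []) lst[i]
      = (true, some lst[i].2,
        ((lst.take i).filter (fun p => !(PySem.Str.isIn p.1 "O"))).map (·.2), []) := by
    simp [ccStep, hmatch]
  simp only [List.foldl_cons, List.nil_append, hstep]
  rw [ccFold_true]
  simp

-- closed form of A when the target occurs
theorem a_of_found (lst : List (String × String)) (t : String) (i : Nat)
    (h : lst.findIdx? (fun p => p.1 == t) = some i) (hi : i < lst.length) :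
    collect_context lst t =
      (let lw := ((lst.take i).filter (fun p => !(PySem.Str.isIn p.1 "O"))).map (·.2)
       let rw := ((lst.drop (i+1)).filter (fun p => !(PySem.Str.isIn p.1 "O"))).map (·.2)
       if PySem.Str.join " " lw == "" || PySem.Str.join " " rw == "" then none
       else some [PySem.Str.join " " lw, PySem.Str.join " " rw, lst[i].2]) := by
  unfold collect_context
  rw [h]
  have hslice1 : PySem.List.slice lst none (some (i : Int)) = lst.take i :=
    PySem.List.slice_to_natCast lst i
  have hslice2 : PySem.List.slice lst (some ((i : Int) + 1)) none = lst.drop (i + 1) := by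
    have hc : ((i : Int) + 1) = ((i + 1 : Nat) : Int) := by push_cast; ring
    rw [hc, PySem.List.slice_from_natCast]
  have hget : PySem.List.pyGetD lst (i : Int) ("", "") = lst[i] := by
    rw [PySem.List.pyGetD_natCast]
    simp [hi]
  simp only [hslice1, hslice2, hget, List.filter_reverse, List.reverse_reverse]
  simp [PySem.List.pyGetD]

theorem collect_context_eq_alt (lst : List (String × String)) (t : String) :
    collect_context lst t = collect_context_alt lst t := by
  cases hfind : lst.findIdx? (fun p => p.1 == t) with
  | none =>
    have hall := List.findIdx?_eq_none_iff.mp hfind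
    unfold collect_context collect_context_alt
    rw [hfind]
    rw [ccFold_false t lst (by intro p hp; simpa using hall p hp) [] []]
    simp
  | some i =>
    obtain ⟨hi, hmatch, hpre⟩ := List.findIdx?_eq_some_iff_getElem.mp hfind
    rw [a_of_found lst t i hfind hi, alt_of_found lst t i hi hmatch hpre]

-- ===== VERDICT (by name: the statement is the Claim_ definition above) =====
theorem collect_context_spec : Claim_equal_collect_context := by
  intro lst target_label _
  unfold Spec_collect_context
  exact collect_context_eq_alt lst target_label
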